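-- pv_equiv track=rewrite | github.com/Doglum/ExePokerWeb | playPoker/cfr.py | forgetfulHistory
-- ===== SOURCE A (Python) =====
-- def getHistoryString(history):
--     """Converts history list to string"""
--     msg = ""
--     for i in history:
--         if i == "Check":
--             msg+="X"
--         elif i == "Fold":
--             msg+="F"
--         elif i == "Raise":
--             msg+="R"
--         elif i == "Call":
--             msg+="C"
--         elif i == "Round":
--             msg+="_"
--     return msg
--
-- def forgetfulHistory(history):
--     """Converts history list to forgetful history string,
--     one where only the actions of this round are remembered"""
--     roundCount = len([act for act in history if act=="Round"])
--     forgetful = ""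
--
--     #preflop
--     if roundCount == 0:
--         forgetful += "p"
--
--     #flop
--     elif roundCount == 1:
--         forgetful += "f"
--
--     #turn
--     elif roundCount == 2:
--         forgetful += "t"
--
--     #river
--     elif roundCount == 3:
--         forgetful += "r"
--
--     if roundCount <= 0:
--         forgetful += getHistoryString(history)
--     else:
--         #gets all history after last round
--         add = getHistoryString(history)
--         addIndex = add.rindex("_")
--         forgetful += add[addIndex+1::]
--     return forgetful
-- ===== SOURCE B (Python) =====
-- def forgetfulHistory(history):
--     code = {"Check": "X", "Fold": "F", "Raise": "R", "Call": "C", "Round": "_"}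
--     tail = ""
--     rounds = 0
--     for act in reversed(history):
--         if act == "Round":
--             rounds += 1
--         elif rounds == 0 and act in code:
--             tail = code[act] + tail
--     return ("pftr"[rounds] if rounds <= 3 else "") + tail
-- ===== Notes on version B (the rewrite author's own statement) =====
-- stated objective: simpler
-- what changed: B is a single backwards pass with an accumulator: walking reversed(history) it prepends encoded actions to the tail only while no 'Round' has been seen yet and counts rounds in the same loop, instead of A's staged passes (count the rounds, encode the whole history, rindex the encoded string, slice).
import Mathlib
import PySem

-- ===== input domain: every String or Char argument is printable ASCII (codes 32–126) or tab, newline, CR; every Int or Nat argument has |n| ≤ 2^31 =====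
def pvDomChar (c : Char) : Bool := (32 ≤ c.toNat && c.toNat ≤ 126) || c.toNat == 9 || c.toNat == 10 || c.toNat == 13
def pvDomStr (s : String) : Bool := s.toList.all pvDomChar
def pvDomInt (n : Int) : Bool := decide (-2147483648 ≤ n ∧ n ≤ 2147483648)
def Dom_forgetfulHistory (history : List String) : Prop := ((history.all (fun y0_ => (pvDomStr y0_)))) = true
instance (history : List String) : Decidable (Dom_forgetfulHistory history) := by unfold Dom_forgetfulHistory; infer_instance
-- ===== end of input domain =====

-- B replaces A's staged passes (count rounds, encode the whole history, rindex, slice) by one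
-- backwards pass that prepends encoded actions until the first 'Round' seen from the end and
-- counts rounds in the same loop (objective: simpler).


-- ===== PORT A =====
-- Python's string msg is built as a List Char and wrapped to String at return.
def getHistoryChars (history : List String) : List Char :=
  history.foldl (fun msg i =>
    if i = "Check" then msg ++ ['X']
    else if i = "Fold" then msg ++ ['F']
    else if i = "Raise" then msg ++ ['R']
    else if i = "Call" then msg ++ ['C']
    else if i = "Round" then msg ++ ['_']
    else msg) []

def forgetfulHistory (history : List String) : String :=
  let roundCount := (history.filter (fun act => act = "Round")).length
  let forgetful : List Char :=
    if roundCount = 0 then ['p']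
    else if roundCount = 1 then ['f']
    else if roundCount = 2 then ['t']
    else if roundCount = 3 then ['r']
    else []
  if roundCount ≤ 0 then
    String.ofList (forgetful ++ getHistoryChars history)
  else
    -- add.rindex('_'): on this branch roundCount > 0, so '_' occurs in add and rindex = rfind
    let add := getHistoryChars history
    let addIndex := PySem.Chars.rfind add ['_']
    String.ofList (forgetful ++ PySem.List.slice add (some (addIndex + 1)) none)

-- ===== PORT B =====
def pvCode : PySem.Dict String Char :=
  PySem.Dict.ofList [("Check", 'X'), ("Fold", 'F'), ("Raise", 'R'), ("Call", 'C'), ("Round", '_')]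

-- the loop body of Source B: state = (tail, rounds)
def pvStep (s : List Char × Nat) (act : String) : List Char × Nat :=
  if act = "Round" then (s.1, s.2 + 1)
  else if s.2 = 0 then
    -- 'act in code' then 'code[act] + tail'
    match PySem.Dict.get? pvCode act with
    | some c => (c :: s.1, s.2)
    | none => s
  else s

def forgetfulHistory_alt (history : List String) : String :=
  let st := history.reverse.foldl pvStep ([], 0)
  -- "pftr"[rounds]: guarded by rounds ≤ 3, so the index is in range
  let pfx : List Char := if st.2 ≤ 3 then ["pftr".toList.getD st.2 ' '] else []
  String.ofList (pfx ++ st.1)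

-- ===== PRECONDITION & SPEC =====
def Spec_forgetfulHistory (history : List String) (out : String) : Prop := out = forgetfulHistory_alt history
instance (history : List String) (out : String) : Decidable (Spec_forgetfulHistory history out) := by unfold Spec_forgetfulHistory; infer_instance

-- ===== CLAIM (what is proved, stated in full; the proofs are below) =====
def Claim_equal_forgetfulHistory : Prop := ∀ (history : List String), Dom_forgetfulHistory history → Spec_forgetfulHistory history (forgetfulHistory history)

-- ===== LEMMAS AND PROOFS =====

-- per-action encoding shared by both characterisations
def encAct (a : String) : List Char :=
  if a = "Check" then ['X']
  else if a = "Fold" then ['F']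
  else if a = "Raise" then ['R']
  else if a = "Call" then ['C']
  else if a = "Round" then ['_']
  else []

theorem getHistoryChars_eq (h : List String) : getHistoryChars h = h.flatMap encAct := by
  have hf : (fun (msg : List Char) (i : String) =>
      if i = "Check" then msg ++ ['X']
      else if i = "Fold" then msg ++ ['F']
      else if i = "Raise" then msg ++ ['R']
      else if i = "Call" then msg ++ ['C']
      else if i = "Round" then msg ++ ['_']
      else msg) = (fun acc x => acc ++ encAct x) := by
    funext msg i
    simp only [encAct]
    split_ifs <;> simp
  simp only [getHistoryChars, hf, PySem.List.foldl_append_eq_flatMap, List.nil_append]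

-- dict lookup agrees with encAct (as an optional character)
theorem get?_code_eq (a : String) : (PySem.Dict.get? pvCode a).toList = encAct a := by
  by_cases h1 : a = "Check"
  · subst h1; decide
  by_cases h2 : a = "Fold"
  · subst h2; decide
  by_cases h3 : a = "Raise"
  · subst h3; decide
  by_cases h4 : a = "Call"
  · subst h4; decide
  by_cases h5 : a = "Round"
  · subst h5; decide
  have hitems : pvCode.items = [("Check", 'X'), ("Fold", 'F'), ("Raise", 'R'), ("Call", 'C'), ("Round", '_')] := by
    decide
  have c1 : ("Check" == a) = false := beq_eq_false_iff_ne.mpr (Ne.symm h1)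
  have c2 : ("Fold" == a) = false := beq_eq_false_iff_ne.mpr (Ne.symm h2)
  have c3 : ("Raise" == a) = false := beq_eq_false_iff_ne.mpr (Ne.symm h3)
  have c4 : ("Call" == a) = false := beq_eq_false_iff_ne.mpr (Ne.symm h4)
  have c5 : ("Round" == a) = false := beq_eq_false_iff_ne.mpr (Ne.symm h5)
  simp [PySem.Dict.get?, hitems, List.find?, encAct, c1, c2, c3, c4, c5, h1, h2, h3, h4, h5]

-- B's loop over a Round-free list with rounds = 0 prepends the reversed encoding
theorem foldl_step_no_round {l : List String} (hl : "Round" ∉ l) (acc : List Char) :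
    l.foldl pvStep (acc, 0) = ((l.flatMap encAct).reverse ++ acc, 0) := by
  induction l generalizing acc with
  | nil => simp
  | cons a t ih =>
    have hna : a ≠ "Round" := fun h => hl (h ▸ List.mem_cons_self)
    have hnt : "Round" ∉ t := fun h => hl (List.mem_cons_of_mem _ h)
    have hstep : pvStep (acc, 0) a = ((encAct a).reverse ++ acc, 0) := by
      have := get?_code_eq a
      cases hg : PySem.Dict.get? pvCode a with
      | none => simp [pvStep, hna, hg]; simpa [hg] using this.symm
      | some c =>
        rw [hg] at this
        simp [pvStep, hna, hg, ← this]
    rw [List.foldl_cons, hstep, ih hnt]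
    simp

-- B's loop with rounds > 0 only counts the rounds
theorem foldl_step_pos (l : List String) (acc : List Char) (r : Nat) :
    l.foldl pvStep (acc, r + 1) = (acc, r + 1 + List.count "Round" l) := by
  induction l generalizing r with
  | nil => simp
  | cons a t ih =>
    by_cases ha : a = "Round"
    · subst ha
      rw [List.foldl_cons, show pvStep (acc, r + 1) "Round" = (acc, r + 2) by simp [pvStep], ih]
      simp
      omega
    · have hb : ("Round" == a) = false := beq_eq_false_iff_ne.mpr (Ne.symm ha)
      rw [List.foldl_cons, show pvStep (acc, r + 1) a = (acc, r + 1) by simp [pvStep, ha], ih]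
      simp [List.count_cons]
      exact ha

-- reversing a flatMap of ≤1-char encodings
theorem reverse_flatMap_encAct (l : List String) :
    (l.flatMap encAct).reverse = l.reverse.flatMap encAct := by
  induction l with
  | nil => rfl
  | cons a t ih =>
    have hrev : (encAct a).reverse = encAct a := by
      simp only [encAct]; split_ifs <;> rfl
    simp [List.flatMap_cons, List.flatMap_append, ih, hrev]

theorem prefix_singleton (l : List Char) : (['_'].isPrefixOf l = true) ↔ l.head? = some '_' := by
  cases l with
  | nil => simp [List.isPrefixOf]
  | cons a t => simp [List.isPrefixOf]; exact eq_comm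

theorem rfind_go_last {u w : List Char} (hw : '_' ∉ w) :
    ∀ k, u.length ≤ k → PySem.Chars.rfind.go (u ++ '_' :: w) ['_'] k = (u.length : Int) := by
  intro k
  induction k with
  | zero =>
    intro hk
    have hu : u = [] := List.eq_nil_of_length_eq_zero (Nat.le_zero.mp hk)
    subst hu
    simp [PySem.Chars.rfind.go, List.isPrefixOf]
  | succ j ih =>
    intro hk
    rw [PySem.Chars.rfind.go.eq_2]
    by_cases he : u.length = j + 1
    · have hdrop : List.drop (j + 1) (u ++ '_' :: w) = '_' :: w := by
        rw [← he, List.drop_append_of_le_length (le_refl _)]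
        simp
      rw [hdrop]
      simp [List.isPrefixOf, he]
    · have hlt : u.length ≤ j := by omega
      have hpre : ¬ (['_'].isPrefixOf (List.drop (j + 1) (u ++ '_' :: w)) = true) := by
        rw [prefix_singleton]
        have hdrop : List.drop (j + 1) (u ++ '_' :: w) = List.drop (j - u.length) w := by
          rw [List.drop_append, List.drop_eq_nil_of_le (by omega),
              show j + 1 - u.length = (j - u.length) + 1 by omega]
          simp
        rw [hdrop]
        intro hh
        exact hw (List.mem_of_mem_drop (List.mem_of_mem_head? hh))
      rw [if_neg hpre]
      exact ih hlt

theorem rfind_last {u w : List Char} (hw : '_' ∉ w) :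
    PySem.Chars.rfind (u ++ '_' :: w) ['_'] = (u.length : Int) := by
  unfold PySem.Chars.rfind
  exact rfind_go_last hw _ (by simp)

theorem underscore_not_mem {v : List String} (hv : "Round" ∉ v) : '_' ∉ v.flatMap encAct := by
  simp only [List.mem_flatMap]
  rintro ⟨a, ha, hc⟩
  have hne : a ≠ "Round" := fun h => hv (h ▸ ha)
  simp only [encAct] at hc
  split_ifs at hc <;> simp_all

theorem last_round_decomp {h : List String} (hm : "Round" ∈ h) :
    ∃ u v, h = u ++ "Round" :: v ∧ "Round" ∉ v := by
  induction h with
  | nil => cases hm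
  | cons a t ih =>
    by_cases hmt : "Round" ∈ t
    · obtain ⟨u, v, hav, hnv⟩ := ih hmt
      exact ⟨a :: u, v, by simp [hav], hnv⟩
    · have ha : a = "Round" := by
        rcases List.mem_cons.mp hm with h | h
        · exact h.symm
        · exact absurd h hmt
      exact ⟨[], t, by simp [ha], hmt⟩

theorem countRound (h : List String) :
    (h.filter (fun act => act = "Round")).length = List.count "Round" h := by
  induction h with
  | nil => rfl
  | cons a t ih =>
    by_cases ha : a = "Round" <;> simp [ha, ih]

theorem prefix_eq (n : Nat) :
    (if n = 0 then ['p'] else if n = 1 then ['f'] else if n = 2 then ['t']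
     else if n = 3 then ['r'] else ([] : List Char)) =
    (if n ≤ 3 then ["pftr".toList.getD n ' '] else []) := by
  match n with
  | 0 => decide
  | 1 => decide
  | 2 => decide
  | 3 => decide
  | (m + 4) =>
    simp [show m + 4 ≠ 1 by omega, show m + 4 ≠ 2 by omega,
          show m + 4 ≠ 3 by omega, show ¬ (m + 4 ≤ 3) by omega]

-- ===== VERDICT (by name: the statement is the Claim_ definition above) =====
theorem forgetfulHistory_spec : Claim_equal_forgetfulHistory := by
  unfold Claim_equal_forgetfulHistory
  intro h _
  unfold Spec_forgetfulHistory forgetfulHistory forgetfulHistory_alt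
  simp only [countRound, getHistoryChars_eq]
  by_cases hm : "Round" ∈ h
  case neg =>
    have hc : List.count "Round" h = 0 := List.count_eq_zero.mpr hm
    have hnr : "Round" ∉ h.reverse := fun hh => hm (List.mem_reverse.mp hh)
    have hfold := foldl_step_no_round hnr []
    rw [reverse_flatMap_encAct, List.reverse_reverse] at hfold
    simp [hc, hfold]
  case pos =>
    obtain ⟨u, v, rfl, hnv⟩ := last_round_decomp hm
    have hcv : List.count "Round" v = 0 := List.count_eq_zero.mpr hnv
    have hcnt : List.count "Round" (u ++ "Round" :: v) = List.count "Round" u + 1 := by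
      simp [List.count_append, hcv]
    have henc : List.flatMap encAct (u ++ "Round" :: v)
        = List.flatMap encAct u ++ '_' :: List.flatMap encAct v := by
      simp [List.flatMap_append, encAct]
    have hrfind : PySem.Chars.rfind (List.flatMap encAct u ++ '_' :: List.flatMap encAct v) ['_']
        = ((List.flatMap encAct u).length : Int) :=
      rfind_last (underscore_not_mem hnv)
    -- B's fold: over v.reverse (no Round, rounds 0), then the Round, then u.reverse (rounds > 0)
    have hnrv : "Round" ∉ v.reverse := fun hh => hnv (List.mem_reverse.mp hh)
    have hfold : (u ++ "Round" :: v).reverse.foldl pvStep ([], 0)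
        = (List.flatMap encAct v, 1 + List.count "Round" u) := by
      rw [show (u ++ "Round" :: v).reverse = v.reverse ++ "Round" :: u.reverse by simp]
      rw [List.foldl_append, foldl_step_no_round hnrv []]
      rw [List.foldl_cons,
        show pvStep ((v.reverse.flatMap encAct).reverse ++ [], 0) "Round"
          = ((v.reverse.flatMap encAct).reverse ++ [], 1) by simp [pvStep]]
      rw [show (1 : Nat) = 0 + 1 by rfl, foldl_step_pos]
      rw [reverse_flatMap_encAct, List.reverse_reverse]
      simp [List.count_reverse]
    have hdropA : ∀ (W : List Char),
        PySem.List.slice (List.flatMap encAct u ++ '_' :: W)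
          (some (((List.flatMap encAct u).length : Int) + 1)) none = W := by
      intro W
      rw [show (((List.flatMap encAct u).length : Int) + 1)
            = (((List.flatMap encAct u).length + 1 : Nat) : Int) by push_cast; ring]
      rw [PySem.List.slice_from_natCast]
      rw [List.drop_append, List.drop_eq_nil_of_le (by omega)]
      simp
    simp only [hcnt, henc, hrfind, hfold, Nat.succ_ne_zero, if_false, Nat.le_zero]
    rw [← prefix_eq]
    rw [hdropA]
    simp [Nat.add_comm]
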